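-- pv_equiv track=rewrite | github.com/098tarik/leetcode-portfolio | Sliding_Windows/alternating.py | alternate_array
-- ===== SOURCE A (Python) =====
-- def alternate_array(nums):
--     if not nums:
--         return 0
--
--     max_seq = 1
--     seq_len = 1
--     r = 1
--
--     while r < len(nums):
--         can_grow = False
--
--         if nums[r] < 10 and nums[r - 1] >= 10:
--             can_grow = True
--         elif nums[r] >= 10 and nums[r - 1] < 10:
--             can_grow = True
--
--         if can_grow:
--             seq_len += 1
--             max_seq = max(seq_len, max_seq)
--         else:
--             seq_len = 1
--
--         r += 1
--
--     return max_seq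
-- ===== SOURCE B (Python) =====
-- def alternate_array(nums):
--     if not nums:
--         return 0
--     # pass 1: collect run-start boundaries (index where the <10 category repeats)
--     starts = [0]
--     for i in range(1, len(nums)):
--         if (nums[i] < 10) == (nums[i - 1] < 10):
--             starts.append(i)
--     starts.append(len(nums))
--     # pass 2: longest run = max gap between consecutive boundaries
--     best = 0
--     for lo, hi in zip(starts, starts[1:]):
--         best = max(best, hi - lo)
--     return best
-- ===== Notes on version B (the rewrite author's own statement) =====
-- stated objective: alternative
-- what changed: Replaces A's live running-counter/running-max scan by a two-pass boundary-table method: first collect the indices where the <10 category repeats (run starts) plus a length sentinel, then return the maximum gap between consecutive boundaries.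
import Mathlib
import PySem

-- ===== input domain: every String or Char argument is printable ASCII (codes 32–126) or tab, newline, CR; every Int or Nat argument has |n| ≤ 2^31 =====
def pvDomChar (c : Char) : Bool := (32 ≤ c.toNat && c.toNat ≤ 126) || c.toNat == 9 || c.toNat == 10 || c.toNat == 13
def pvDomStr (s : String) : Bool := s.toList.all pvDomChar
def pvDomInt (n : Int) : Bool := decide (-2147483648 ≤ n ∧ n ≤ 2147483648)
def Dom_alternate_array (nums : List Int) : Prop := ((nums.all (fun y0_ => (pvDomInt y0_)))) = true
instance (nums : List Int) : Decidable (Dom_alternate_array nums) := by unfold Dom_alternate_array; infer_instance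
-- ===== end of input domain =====

-- B replaces A's single running-counter scan by a boundary table (run starts + sentinel) and a max-over-gaps pass; same O(n) cost, equivalence proved below.

-- ===== PORT A =====
-- the while-loop body of A (state = (max_seq, seq_len), r the loop index)
def aStep (nums : List Int) (st : Int × Int) (r : Int) : Int × Int :=
  let can_grow :=
    if PySem.List.pyGetD nums r 0 < 10 ∧ 10 ≤ PySem.List.pyGetD nums (r - 1) 0 then true
    else if 10 ≤ PySem.List.pyGetD nums r 0 ∧ PySem.List.pyGetD nums (r - 1) 0 < 10 then true
    else false
  if can_grow then (max (st.2 + 1) st.1, st.2 + 1) else (st.1, 1)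

def alternate_array (nums : List Int) : Int :=
  if nums = [] then 0
  else ((PySem.List.pyRange 1 (PySem.List.len nums) 1).foldl (aStep nums) (1, 1)).1

-- ===== PORT B =====
-- loop body of B's first pass: append i when the <10 category repeats at i
def bStep (nums : List Int) (acc : List Int) (i : Int) : List Int :=
  if (decide (PySem.List.pyGetD nums i 0 < 10) == decide (PySem.List.pyGetD nums (i - 1) 0 < 10))
  then acc ++ [i] else acc

def alternate_array_alt (nums : List Int) : Int :=
  if nums = [] then 0
  else
    let starts := (PySem.List.pyRange 1 (PySem.List.len nums) 1).foldl (bStep nums) [0]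
    let starts := starts ++ [PySem.List.len nums]
    (starts.zip (PySem.List.slice starts (some 1) none)).foldl
      (fun best p => max best (p.2 - p.1)) 0

-- ===== PRECONDITION & SPEC =====
def Spec_alternate_array (nums : List Int) (out : Int) : Prop := out = alternate_array_alt nums
instance (nums : List Int) (out : Int) : Decidable (Spec_alternate_array nums out) := by unfold Spec_alternate_array; infer_instance

-- ===== CLAIM (what is proved, stated in full; the proofs are below) =====
def Claim_equal_alternate_array : Prop := ∀ (nums : List Int), Dom_alternate_array nums → Spec_alternate_array nums (alternate_array nums)

-- ===== LEMMAS AND PROOFS =====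

-- B's second pass as a function of the boundary list
def gapMax (s : List Int) : Int :=
  (s.zip s.tail).foldl (fun best p => max best (p.2 - p.1)) 0

-- B's boundary list after scanning indices 1..j-1
def bStarts (nums : List Int) (j : Nat) : List Int :=
  (PySem.List.pyRange 1 (j : Int) 1).foldl (bStep nums) [0]

lemma foldl_bStep_ne_nil (nums : List Int) (l : List Int) (acc : List Int) (h : acc ≠ []) :
    l.foldl (bStep nums) acc ≠ [] := by
  induction l generalizing acc with
  | nil => exact h
  | cons x t ih =>
    simp only [List.foldl_cons]
    apply ih
    unfold bStep
    split <;> simp_all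

lemma bStarts_ne_nil (nums : List Int) (j : Nat) : bStarts nums j ≠ [] :=
  foldl_bStep_ne_nil nums _ _ (by simp)

lemma zip_tail_append (s : List Int) (hs : s ≠ []) (x : Int) :
    (s ++ [x]).zip (s ++ [x]).tail = s.zip s.tail ++ [(s.getLastD 0, x)] := by
  induction s with
  | nil => exact absurd rfl hs
  | cons a t ih =>
    cases t with
    | nil => simp
    | cons b u =>
      have := ih (by simp)
      simp only [List.cons_append, List.tail_cons, List.zip_cons_cons] at this ⊢
      rw [this]
      simp [List.getLastD]

lemma gapMax_append (s : List Int) (hs : s ≠ []) (x : Int) :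
    gapMax (s ++ [x]) = max (gapMax s) (x - s.getLastD 0) := by
  unfold gapMax
  rw [zip_tail_append s hs x, List.foldl_append]
  rfl

lemma getLastD_append_singleton (s : List Int) (x : Int) : (s ++ [x]).getLastD 0 = x := by
  simp

-- characterisations of the two loop bodies as a single if on the category comparison
lemma aStep_eq (nums : List Int) (st : Int × Int) (r : Int) :
    aStep nums st r =
      if (PySem.List.pyGetD nums r 0 < 10 ∧ 10 ≤ PySem.List.pyGetD nums (r - 1) 0)
         ∨ (10 ≤ PySem.List.pyGetD nums r 0 ∧ PySem.List.pyGetD nums (r - 1) 0 < 10)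
      then (max (st.2 + 1) st.1, st.2 + 1) else (st.1, 1) := by
  simp only [aStep]
  split_ifs <;> simp_all
  omega

lemma bStep_eq (nums : List Int) (acc : List Int) (i : Int) :
    bStep nums acc i =
      if (PySem.List.pyGetD nums i 0 < 10 ↔ PySem.List.pyGetD nums (i - 1) 0 < 10)
      then acc ++ [i] else acc := by
  simp only [bStep, Bool.beq_eq_decide_eq, decide_eq_decide]
  split_ifs <;> simp_all

-- the loop invariant connecting A's running state to B's boundary table
lemma loop_inv (nums : List Int) (j : Nat) (hj : 1 ≤ j) :
    ((PySem.List.pyRange 1 (j : Int) 1).foldl (aStep nums) (1, 1)) =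
      (gapMax (bStarts nums j ++ [(j : Int)]), (j : Int) - (bStarts nums j).getLastD 0)
    ∧ 1 ≤ gapMax (bStarts nums j ++ [(j : Int)]) := by
  induction j, hj using Nat.le_induction with
  | base =>
    constructor
    · simp [PySem.List.pyRange_one_eq_nil, bStarts, gapMax]
    · simp [bStarts, gapMax, PySem.List.pyRange_one_eq_nil]
  | succ j hj ih =>
    obtain ⟨ihe, ihm⟩ := ih
    have hj' : (1 : Int) ≤ (j : Int) := by exact_mod_cast hj
    have hcast : ((j + 1 : Nat) : Int) = (j : Int) + 1 := by push_cast; ring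
    have hsplit : PySem.List.pyRange 1 ((j + 1 : Nat) : Int) 1 =
        PySem.List.pyRange 1 (j : Int) 1 ++ [(j : Int)] := by
      rw [hcast]; exact PySem.List.pyRange_one_succ_right hj'
    have hS : bStarts nums (j + 1) = bStep nums (bStarts nums j) (j : Int) := by
      unfold bStarts
      rw [hsplit, List.foldl_append]
      rfl
    have hSne : bStarts nums j ≠ [] := bStarts_ne_nil nums j
    rw [hsplit, List.foldl_append, List.foldl_cons, List.foldl_nil, ihe, hS,
        aStep_eq, bStep_eq, hcast]
    by_cases hx : PySem.List.pyGetD nums (j : Int) 0 < 10 <;>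
      by_cases hy : PySem.List.pyGetD nums ((j : Int) - 1) 0 < 10
    -- both < 10: category repeats, new boundary at j
    · rw [if_neg (by omega), if_pos (by tauto)]
      rw [gapMax_append (bStarts nums j ++ [(j : Int)]) (by simp) ((j : Int) + 1),
          getLastD_append_singleton]
      simp only [Prod.mk.injEq]
      refine ⟨⟨?_, ?_⟩, ?_⟩ <;> omega
    -- alternates: run grows
    · rw [if_pos (Or.inl ⟨hx, not_lt.mp hy⟩), if_neg (by tauto)]
      rw [gapMax_append (bStarts nums j) hSne ((j : Int) + 1)]
      rw [gapMax_append (bStarts nums j) hSne (j : Int)] at ihe ihm ⊢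
      simp only [Prod.mk.injEq]
      refine ⟨⟨?_, ?_⟩, ?_⟩ <;> omega
    -- alternates: run grows
    · rw [if_pos (Or.inr ⟨not_lt.mp hx, hy⟩), if_neg (by tauto)]
      rw [gapMax_append (bStarts nums j) hSne ((j : Int) + 1)]
      rw [gapMax_append (bStarts nums j) hSne (j : Int)] at ihe ihm ⊢
      simp only [Prod.mk.injEq]
      refine ⟨⟨?_, ?_⟩, ?_⟩ <;> omega
    -- both ≥ 10: category repeats, new boundary at j
    · rw [if_neg (by omega), if_pos (by tauto)]
      rw [gapMax_append (bStarts nums j ++ [(j : Int)]) (by simp) ((j : Int) + 1),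
          getLastD_append_singleton]
      simp only [Prod.mk.injEq]
      refine ⟨⟨?_, ?_⟩, ?_⟩ <;> omega

-- ===== VERDICT (by name: the statement is the Claim_ definition above) =====
theorem alternate_array_spec : Claim_equal_alternate_array := by
  intro nums _
  unfold Spec_alternate_array alternate_array alternate_array_alt
  by_cases h : nums = []
  · simp [h]
  · simp only [h, if_false]
    have hn : 1 ≤ nums.length := by
      cases nums with
      | nil => exact absurd rfl h
      | cons a t => simp
    have hlen : PySem.List.len nums = (nums.length : Int) := by
      simp [PySem.List.len_eq]
    rw [hlen]
    obtain ⟨he, _⟩ := loop_inv nums nums.length hn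
    rw [he]
    have hstarts : (PySem.List.pyRange 1 (nums.length : Int) 1).foldl (bStep nums) [0] =
        bStarts nums nums.length := rfl
    rw [hstarts, PySem.List.slice_from_one]
    rfl
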